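-- pv_equiv track=rewrite | github.com/vishwaspuriofficial/Coding-Practice | Code Signal/1. Intro/3. Smooth Sailing/9. All Longest Strings.py | solution
-- ===== SOURCE A (Python) =====
-- def solution(inputArray):
--     longest = 0
--     for i in inputArray:
--         if len(i) > longest:
--             longest = len(i)
--     longestStrings = []
--     for j in inputArray:
--         if len(j) == longest:
--             longestStrings.append(j)
--
--     return longestStrings
-- ===== SOURCE B (Python) =====
-- def solution(inputArray):
--     longest = 0
--     result = []
--     for s in inputArray:
--         if len(s) > longest:
--             longest = len(s)
--             result = [s]
--         elif len(s) == longest: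
--             result.append(s)
--     return result
-- ===== Notes on version B (the rewrite author's own statement) =====
-- stated objective: alternative
-- what changed: Replaces A's two passes (one to find the maximal length, one to filter) by a single pass that maintains the running maximum and resets/extends the answer list as it goes.
import Mathlib
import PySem

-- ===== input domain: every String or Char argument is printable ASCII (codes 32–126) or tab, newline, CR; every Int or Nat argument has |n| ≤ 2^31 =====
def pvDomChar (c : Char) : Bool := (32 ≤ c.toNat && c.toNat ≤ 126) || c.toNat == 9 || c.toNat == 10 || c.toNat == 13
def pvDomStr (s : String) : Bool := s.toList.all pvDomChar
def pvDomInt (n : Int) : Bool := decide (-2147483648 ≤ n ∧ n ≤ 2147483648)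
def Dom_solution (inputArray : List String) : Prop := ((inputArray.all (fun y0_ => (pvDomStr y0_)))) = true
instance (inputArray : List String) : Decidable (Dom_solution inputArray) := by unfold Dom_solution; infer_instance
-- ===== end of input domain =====

-- B is a single-pass re-implementation (running maximum with reset) of A's two-pass max-then-filter; return value only, no speed claim.

-- ===== PORT A =====
def solution (inputArray : List String) : List String :=
  let longest := inputArray.foldl
    (fun longest i => if PySem.Str.len i > longest then PySem.Str.len i else longest) 0
  inputArray.foldl
    (fun longestStrings j =>
      if PySem.Str.len j = longest then longestStrings ++ [j] else longestStrings) []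

-- ===== PORT B =====
def solution_alt (inputArray : List String) : List String :=
  (inputArray.foldl
    (fun (st : Int × List String) s =>
      if PySem.Str.len s > st.1 then (PySem.Str.len s, [s])
      else if PySem.Str.len s = st.1 then (st.1, st.2 ++ [s])
      else st) ((0 : Int), ([] : List String))).2

-- ===== PRECONDITION & SPEC =====
def Spec_solution (inputArray : List String) (out : List String) : Prop := out = solution_alt inputArray
instance (inputArray : List String) (out : List String) : Decidable (Spec_solution inputArray out) := by unfold Spec_solution; infer_instance

-- ===== CLAIM (what is proved, stated in full; the proofs are below) =====
def Claim_equal_solution : Prop := ∀ (inputArray : List String), Dom_solution inputArray → Spec_solution inputArray (solution inputArray)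

-- ===== LEMMAS AND PROOFS =====

-- running maximum of A's first loop, started at L
def pvMlen (xs : List String) (L : Int) : Int :=
  xs.foldl (fun longest i => if PySem.Str.len i > longest then PySem.Str.len i else longest) L

-- B's single-pass loop, as a named function of the state
def pvLoopB (xs : List String) (st : Int × List String) : Int × List String :=
  xs.foldl
    (fun (st : Int × List String) s =>
      if PySem.Str.len s > st.1 then (PySem.Str.len s, [s])
      else if PySem.Str.len s = st.1 then (st.1, st.2 ++ [s])
      else st) st

theorem pvMlen_ge (xs : List String) (L : Int) : L ≤ pvMlen xs L := by
  induction xs generalizing L with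
  | nil => simp [pvMlen]
  | cons s xs ih =>
    simp only [pvMlen, List.foldl_cons]
    by_cases h : PySem.Str.len s > L
    · simp only [if_pos h]
      exact le_of_lt (lt_of_lt_of_le h (ih (PySem.Str.len s)))
    · simp only [if_neg h]; exact ih L

theorem pvLoopB_spec (xs : List String) (L : Int) (acc : List String) :
    pvLoopB xs (L, acc) =
      (pvMlen xs L,
        (if pvMlen xs L > L then ([] : List String) else acc)
          ++ xs.filter (fun s => PySem.Str.len s = pvMlen xs L)) := by
  induction xs generalizing L acc with
  | nil => simp [pvLoopB, pvMlen]
  | cons s xs ih =>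
    have hstep : ∀ M : Int, pvMlen (s :: xs) M
        = pvMlen xs (if PySem.Str.len s > M then PySem.Str.len s else M) := by
      intro M; rfl
    by_cases h1 : PySem.Str.len s > L
    · have hM : pvMlen (s :: xs) L = pvMlen xs (PySem.Str.len s) := by
        rw [hstep, if_pos h1]
      have hMge : PySem.Str.len s ≤ pvMlen xs (PySem.Str.len s) := pvMlen_ge _ _
      have hMgtL : pvMlen xs (PySem.Str.len s) > L := lt_of_lt_of_le h1 hMge
      simp only [pvLoopB, List.foldl_cons, if_pos h1]
      rw [show (List.foldl _ _ _ : Int × List String) = pvLoopB xs (PySem.Str.len s, [s]) from rfl,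
        ih, hM, if_pos hMgtL]
      by_cases h2 : pvMlen xs (PySem.Str.len s) > PySem.Str.len s
      · have hne : ¬ (PySem.Str.len s = pvMlen xs (PySem.Str.len s)) := by omega
        simp only [PySem.Str.len_eq, String.length_toList] at hne
        have h2' : (↑s.length : Int) < pvMlen xs (PySem.Str.len s) := by
          simpa [PySem.Str.len_eq] using h2
        simp only [PySem.Str.len_eq, String.length_toList] at h2' hne ⊢
        simp [List.filter_cons, h2', hne]
      · have heq : PySem.Str.len s = pvMlen xs (PySem.Str.len s) := by omega
        have heq' := heq
        simp only [PySem.Str.len_eq, String.length_toList] at heq'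
        simp only [PySem.Str.len_eq, String.length_toList] at heq' ⊢
        have h2' : ¬ ((↑s.length : Int) < pvMlen xs (↑s.length : Int)) := by omega
        have hd : decide ((↑s.length : Int) = pvMlen xs (↑s.length : Int)) = true :=
          decide_eq_true heq'
        simp [List.filter_cons, hd, h2']
    · have hM : pvMlen (s :: xs) L = pvMlen xs L := by
        rw [hstep, if_neg h1]
      simp only [pvLoopB, List.foldl_cons, if_neg h1]
      by_cases h2 : PySem.Str.len s = L
      · simp only [if_pos h2]
        rw [show (List.foldl _ _ _ : Int × List String) = pvLoopB xs (L, acc ++ [s]) from rfl,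
          ih, hM]
        by_cases h3 : pvMlen xs L > L
        · have hne : ¬ (PySem.Str.len s = pvMlen xs L) := by omega
          simp only [PySem.Str.len_eq, String.length_toList] at hne
          simp [if_pos h3, List.filter_cons, hne]
        · have hLe : pvMlen xs L = L := le_antisymm (by omega) (pvMlen_ge xs L)
          have h2' := h2
          simp only [PySem.Str.len_eq, String.length_toList] at h2'
          simp [if_neg h3, List.filter_cons, hLe, h2']
      · simp only [if_neg h2]
        rw [show (List.foldl _ _ _ : Int × List String) = pvLoopB xs (L, acc) from rfl, ih, hM]
        have hne0 : PySem.Str.len s < L := by omega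
        have hne : ¬ (PySem.Str.len s = pvMlen xs L) := by
          have := pvMlen_ge xs L; omega
        simp only [PySem.Str.len_eq, String.length_toList] at hne
        by_cases h3 : pvMlen xs L > L
        · simp [if_pos h3, List.filter_cons, hne]
        · simp [if_neg h3, List.filter_cons, hne]

-- ===== VERDICT (by name: the statement is the Claim_ definition above) =====
theorem solution_spec : Claim_equal_solution := by
  intro xs _
  show solution xs = solution_alt xs
  have hB : solution_alt xs = (pvLoopB xs (0, [])).2 := rfl
  rw [hB, pvLoopB_spec]
  simp only [solution]
  rw [show (xs.foldl (fun longest i => if PySem.Str.len i > longest then PySem.Str.len i else longest) 0) = pvMlen xs 0 from rfl]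
  rw [PySem.List.foldl_append_ite_eq_filter]
  by_cases h : pvMlen xs 0 > 0 <;> simp [h]
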